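-- pv_equiv track=rewrite | github.com/Jack-Liu0227/inversedesign | src/fewshot/predictor.py | _to_ordered_processing_route
-- ===== SOURCE A (Python) =====
-- from typing import Any, Dict, List, Optional
--
-- def _to_ordered_processing_route(processing: Dict[str, Any]) -> str:
--     if not isinstance(processing, dict) or not processing:
--         return ""
--
--     def _stage_rank(raw_key: str) -> int:
--         key = str(raw_key).strip().lower().replace("_", " ")
--         if "cast" in key or "熔" in key or "铸" in key:
--             return 10
--         if "forge" in key or "thermo" in key or "rolling" in key or "轧" in key or "锻" in key:
--             return 20
--         if "solution" in key or "固溶" in key: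
--             return 30
--         if "quench" in key or "淬" in key:
--             return 40
--         if "age" in key or "时效" in key:
--             return 50
--         if "temper" in key or "回火" in key:
--             return 60
--         if "anneal" in key or "退火" in key:
--             return 70
--         if "cool" in key or "冷却" in key:
--             return 80
--         return 90
--
--     ordered_items = sorted(
--         [(str(k), str(v).strip()) for k, v in processing.items() if v is not None and str(v).strip()],
--         key=lambda kv: (_stage_rank(kv[0]), kv[0].lower()),
--     )
--     if not ordered_items:
--         return ""
--
--     parts: List[str] = []
--     for key, value in ordered_items:
--         normalized_key = key.strip().lower().replace("_", " ")
--         if normalized_key in {"heat treatment method", "processing description", "process description"}: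
--             parts.append(value)
--         else:
--             parts.append(value)
--     return " -> ".join(parts)
-- ===== SOURCE B (Python) =====
-- from typing import Any, Dict, List
--
-- _STAGES = (
--     (10, ("cast", "\u7194", "\u94f8")),
--     (20, ("forge", "thermo", "rolling", "\u8f67", "\u953b")),
--     (30, ("solution", "\u56fa\u6eb6")),
--     (40, ("quench", "淬")),
--     (50, ("age", "\u65f6\u6548")),
--     (60, ("temper", "\u56de\u706b")),
--     (70, ("anneal", "\u9000\u706b")),
--     (80, ("cool", "\u51b7\u5374")),
-- )
--
--
-- def _stage_rank(raw_key: str) -> int: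
--     key = str(raw_key).strip().lower().replace("_", " ")
--     for rank, words in _STAGES:
--         if any(w in key for w in words):
--             return rank
--     return 90
--
--
-- def _to_ordered_processing_route(processing: Dict[str, Any]) -> str:
--     if not isinstance(processing, dict) or not processing:
--         return ""
--     items = [(str(k), str(v).strip()) for k, v in processing.items()
--              if v is not None and str(v).strip()]
--     parts = [v
--              for rank in (10, 20, 30, 40, 50, 60, 70, 80, 90)
--              for _, v in sorted((kv for kv in items if _stage_rank(kv[0]) == rank),
--                                 key=lambda kv: kv[0].lower())]
--     return " -> ".join(parts)
-- ===== Notes on version B (the rewrite author's own statement) =====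
-- stated objective: alternative
-- what changed: Replaces the single global sort by the composite key (rank, key.lower()) with a table-driven _stage_rank and nine fixed-rank bucket passes: for each rank 10..90 in order, the surviving items of that rank are stably sorted by key.lower() and their values appended, removing the composite-key sort and the dead membership branch.
import Mathlib
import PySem

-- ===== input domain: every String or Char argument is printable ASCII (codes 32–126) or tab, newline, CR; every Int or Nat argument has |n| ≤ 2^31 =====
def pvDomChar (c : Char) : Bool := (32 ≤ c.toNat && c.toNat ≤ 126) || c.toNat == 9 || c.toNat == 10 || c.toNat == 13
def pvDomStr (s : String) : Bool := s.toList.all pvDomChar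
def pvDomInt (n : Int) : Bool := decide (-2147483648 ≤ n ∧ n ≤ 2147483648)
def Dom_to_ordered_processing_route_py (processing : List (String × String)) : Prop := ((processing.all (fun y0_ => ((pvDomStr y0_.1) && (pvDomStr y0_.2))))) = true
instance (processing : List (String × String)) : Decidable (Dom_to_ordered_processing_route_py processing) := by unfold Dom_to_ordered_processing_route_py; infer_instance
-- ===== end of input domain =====

-- B replaces A's single sort by the composite key (rank, key.lower()) with a table-driven
-- rank function and nine fixed-rank bucket passes, each stably sorted by key.lower() (alternative).

-- ===== PORT A =====
def pvStageRankA (raw_key : String) : Int :=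
  let key := PySem.Str.replace (PySem.Str.lower (PySem.Str.strip raw_key)) "_" " "
  if PySem.Str.isIn "cast" key || PySem.Str.isIn "熔" key || PySem.Str.isIn "铸" key then 10
  else if PySem.Str.isIn "forge" key || PySem.Str.isIn "thermo" key || PySem.Str.isIn "rolling" key || PySem.Str.isIn "轧" key || PySem.Str.isIn "锻" key then 20
  else if PySem.Str.isIn "solution" key || PySem.Str.isIn "固溶" key then 30
  else if PySem.Str.isIn "quench" key || PySem.Str.isIn "淬" key then 40
  else if PySem.Str.isIn "age" key || PySem.Str.isIn "时效" key then 50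
  else if PySem.Str.isIn "temper" key || PySem.Str.isIn "回火" key then 60
  else if PySem.Str.isIn "anneal" key || PySem.Str.isIn "退火" key then 70
  else if PySem.Str.isIn "cool" key || PySem.Str.isIn "冷却" key then 80
  else 90

def to_ordered_processing_route_py (processing : List (String × String)) : String :=
  if processing = [] then ""
  else
    let ordered_items := PySem.List.sorted2
      ((processing.filter (fun kv => !(PySem.Str.strip kv.2 == ""))).map
        (fun kv => (kv.1, PySem.Str.strip kv.2)))
      (fun kv => pvStageRankA kv.1) (fun kv => PySem.Str.lower kv.1)
    if ordered_items = [] then ""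
    else
      let parts := ordered_items.foldl (fun acc kv =>
        let normalized_key := PySem.Str.replace (PySem.Str.lower (PySem.Str.strip kv.1)) "_" " "
        if normalized_key = "heat treatment method" ∨ normalized_key = "processing description" ∨ normalized_key = "process description" then
          acc ++ [kv.2]
        else
          acc ++ [kv.2]) []
      PySem.Str.join " -> " parts

-- ===== PORT B =====
def pvStages : List (Int × List String) :=
  [(10, ["cast", "熔", "铸"]),
   (20, ["forge", "thermo", "rolling", "轧", "锻"]),
   (30, ["solution", "固溶"]),
   (40, ["quench", "淬"]),
   (50, ["age", "时效"]),
   (60, ["temper", "回火"]),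
   (70, ["anneal", "退火"]),
   (80, ["cool", "冷却"])]

def pvStageRankB (raw_key : String) : Int :=
  let key := PySem.Str.replace (PySem.Str.lower (PySem.Str.strip raw_key)) "_" " "
  match pvStages.find? (fun rw => rw.2.any (fun w => PySem.Str.isIn w key)) with
  | some rw => rw.1
  | none => 90

def to_ordered_processing_route_py_alt (processing : List (String × String)) : String :=
  if processing = [] then ""
  else
    let items := (processing.filter (fun kv => !(PySem.Str.strip kv.2 == ""))).map
      (fun kv => (kv.1, PySem.Str.strip kv.2))
    let parts := ([10, 20, 30, 40, 50, 60, 70, 80, 90] : List Int).flatMap (fun r =>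
      (PySem.List.sorted (items.filter (fun kv => pvStageRankB kv.1 == r))
        (fun kv => PySem.Str.lower kv.1) false).map (fun kv => kv.2))
    PySem.Str.join " -> " parts

-- ===== PRECONDITION & SPEC =====
def Spec_to_ordered_processing_route_py (processing : List (String × String)) (out : String) : Prop := out = to_ordered_processing_route_py_alt processing
instance (processing : List (String × String)) (out : String) : Decidable (Spec_to_ordered_processing_route_py processing out) := by unfold Spec_to_ordered_processing_route_py; infer_instance

-- ===== CLAIM (what is proved, stated in full; the proofs are below) =====
def Claim_equal_to_ordered_processing_route_py : Prop := ∀ (processing : List (String × String)), Dom_to_ordered_processing_route_py processing → Spec_to_ordered_processing_route_py processing (to_ordered_processing_route_py processing)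

-- ===== LEMMAS AND PROOFS =====

-- the two rank functions agree
theorem pvStageRank_eq (k : String) : pvStageRankA k = pvStageRankB k := by
  unfold pvStageRankA pvStageRankB pvStages
  simp only [List.find?, List.any_cons, List.any_nil, Bool.or_false, Bool.or_assoc]
  split_ifs <;> simp_all only [Bool.not_eq_true]

theorem pvStageRankA_mem (k : String) :
    pvStageRankA k ∈ ([10, 20, 30, 40, 50, 60, 70, 80, 90] : List Int) := by
  simp only [pvStageRankA]
  split_ifs <;> simp

-- insertBy passes over a prefix it never inserts into
theorem insertBy_skip {α : Type} (before : α → α → Bool) (x : α) (l1 l2 : List α)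
    (h : ∀ y ∈ l1, before x y = false) :
    PySem.List.insertBy before x (l1 ++ l2) = l1 ++ PySem.List.insertBy before x l2 := by
  induction l1 with
  | nil => rfl
  | cons y ys ih =>
    have hy : before x y = false := h y (by simp)
    simp only [List.cons_append, PySem.List.insertBy, hy]
    simp only [Bool.false_eq_true, if_false]
    rw [ih (fun z hz => h z (by simp [hz]))]

-- insertBy stops before a suffix that is entirely after x
theorem insertBy_append_right {α : Type} (before : α → α → Bool) (x : α) (l1 l2 : List α)
    (h : ∀ y ∈ l2, before x y = true) :
    PySem.List.insertBy before x (l1 ++ l2) = PySem.List.insertBy before x l1 ++ l2 := by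
  induction l1 with
  | nil =>
    cases l2 with
    | nil => rfl
    | cons z zs =>
      have hz : before x z = true := h z (by simp)
      simp [PySem.List.insertBy, hz]
  | cons y ys ih =>
    by_cases hy : before x y = true
    · simp [PySem.List.insertBy, hy]
    · simp only [List.cons_append, PySem.List.insertBy]
      rw [Bool.not_eq_true] at hy
      simp [hy, ih]

theorem insertBy_congr {α : Type} (before before' : α → α → Bool) (x : α) (l : List α)
    (h : ∀ y ∈ l, before x y = before' x y) :
    PySem.List.insertBy before x l = PySem.List.insertBy before' x l := by
  induction l with
  | nil => rfl
  | cons y ys ih =>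
    have hy := h y (by simp)
    simp only [PySem.List.insertBy, hy]
    by_cases h' : before' x y = true
    · simp [h']
    · simp only [h']
      rw [ih (fun z hz => h z (by simp [hz]))]

-- appending one element to the input of sorted2 / sorted inserts it
theorem sorted2_append_singleton {α κ₁ κ₂ : Type} [LinearOrder κ₁] [LinearOrder κ₂]
    (xs : List α) (x : α) (k1 : α → κ₁) (k2 : α → κ₂) :
    PySem.List.sorted2 (xs ++ [x]) k1 k2 false =
      PySem.List.insertBy
        (fun a b => decide (k1 a < k1 b) || (!decide (k1 b < k1 a) && decide (k2 a < k2 b)))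
        x (PySem.List.sorted2 xs k1 k2 false) := by
  simp [PySem.List.sorted2, List.foldl_append]

theorem sorted_append_singleton {α κ : Type} [LinearOrder κ]
    (xs : List α) (x : α) (key : α → κ) :
    PySem.List.sorted (xs ++ [x]) key false =
      PySem.List.insertBy (fun a b => decide (key a < key b)) x
        (PySem.List.sorted xs key false) := by
  simp [PySem.List.sorted, List.foldl_append]

-- MAIN LEMMA: a stable sort by the lexicographic key (k1, k2), with k1 ranging over a
-- strictly increasing rank list, is the concatenation over the ranks of the per-rank
-- buckets each stably sorted by k2.
theorem sorted2_eq_flatMap_buckets {α : Type} (k1 : α → Int) (k2 : α → String)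
    (ranks : List Int) (hp : ranks.Pairwise (· < ·)) :
    ∀ xs : List α, (∀ x ∈ xs, k1 x ∈ ranks) →
    PySem.List.sorted2 xs k1 k2 false =
      ranks.flatMap (fun r =>
        PySem.List.sorted (xs.filter (fun x => k1 x == r)) k2 false) := by
  intro xs
  induction xs using List.reverseRecOn with
  | nil => intro _; simp [PySem.List.sorted2, PySem.List.sorted]
  | append_singleton xs x ih =>
    intro hall
    have hxs : ∀ y ∈ xs, k1 y ∈ ranks := fun y hy => hall y (by simp [hy])
    have hx : k1 x ∈ ranks := hall x (by simp)
    obtain ⟨L1, L2, hL⟩ := List.append_of_mem hx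
    subst hL
    -- facts from strict sortedness of the rank list
    rw [List.pairwise_append] at hp
    obtain ⟨hp1, hp2, h12⟩ := hp
    rw [List.pairwise_cons] at hp2
    obtain ⟨hgt, _⟩ := hp2
    have hlt : ∀ r ∈ L1, r < k1 x := fun r hr => h12 r hr (k1 x) (by simp)
    -- filters over xs ++ [x]
    have hfilter_ne : ∀ r : Int, r ≠ k1 x →
        (xs ++ [x]).filter (fun y => k1 y == r) = xs.filter (fun y => k1 y == r) := by
      intro r hr
      simp [List.filter_append, Ne.symm hr]
    have hfilter_eq : (xs ++ [x]).filter (fun y => k1 y == k1 x) =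
        xs.filter (fun y => k1 y == k1 x) ++ [x] := by
      simp [List.filter_append]
    -- name the buckets over xs
    set F := fun r => PySem.List.sorted (xs.filter (fun y => k1 y == r)) k2 false with hF
    have hmemF : ∀ r, ∀ y ∈ F r, k1 y = r := by
      intro r y hy
      rw [hF] at hy
      simp only [PySem.List.mem_sorted, List.mem_filter, beq_iff_eq] at hy
      exact hy.2
    rw [sorted2_append_singleton, ih hxs]
    set before := fun a b => decide (k1 a < k1 b) || (!decide (k1 b < k1 a) && decide (k2 a < k2 b)) with hbefore
    have hflat : (L1 ++ k1 x :: L2).flatMap F = L1.flatMap F ++ (F (k1 x) ++ L2.flatMap F) := by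
      simp [List.flatMap_append]
    rw [hflat]
    have hskip : ∀ y ∈ L1.flatMap F, before x y = false := by
      intro y hy
      rw [List.mem_flatMap] at hy
      obtain ⟨r, hr, hyF⟩ := hy
      have h1 : k1 y = r := hmemF r y hyF
      have h2 : r < k1 x := hlt r hr
      rw [hbefore]
      simp only [Bool.or_eq_false_iff, Bool.and_eq_false_iff]
      constructor
      · simp [h1]; omega
      · left; simp [h1]; omega
    have hright : ∀ y ∈ L2.flatMap F, before x y = true := by
      intro y hy
      rw [List.mem_flatMap] at hy
      obtain ⟨r, hr, hyF⟩ := hy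
      have h1 : k1 y = r := hmemF r y hyF
      have h2 : k1 x < r := hgt r hr
      rw [hbefore]
      simp [h1, h2]
    rw [insertBy_skip before x _ _ hskip,
        insertBy_append_right before x _ _ hright]
    have hmid : PySem.List.insertBy before x (F (k1 x)) =
        PySem.List.sorted ((xs ++ [x]).filter (fun y => k1 y == k1 x)) k2 false := by
      rw [hfilter_eq, sorted_append_singleton]
      have hFx : PySem.List.sorted (xs.filter (fun y => k1 y == k1 x)) k2 false = F (k1 x) := by
        rw [hF]
      rw [hFx]
      apply insertBy_congr
      intro y hy
      have h1 : k1 y = k1 x := hmemF (k1 x) y hy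
      rw [hbefore]
      simp [h1]
    rw [hmid]
    -- reassemble the flatMap over xs ++ [x]
    have hL1 : L1.flatMap F = L1.flatMap (fun r =>
        PySem.List.sorted ((xs ++ [x]).filter (fun y => k1 y == r)) k2 false) := by
      apply List.flatMap_congr
      intro r hr
      rw [hF, hfilter_ne r (by have := hlt r hr; omega)]
    have hL2 : L2.flatMap F = L2.flatMap (fun r =>
        PySem.List.sorted ((xs ++ [x]).filter (fun y => k1 y == r)) k2 false) := by
      apply List.flatMap_congr
      intro r hr
      rw [hF, hfilter_ne r (by have := hgt r hr; omega)]
    rw [hL1, hL2]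
    simp [List.flatMap_append]

theorem pvRanks_pairwise : ([10, 20, 30, 40, 50, 60, 70, 80, 90] : List Int).Pairwise (· < ·) := by
  decide

-- ===== VERDICT (by name: the statement is the Claim_ definition above) =====
set_option maxHeartbeats 1000000 in
theorem to_ordered_processing_route_py_spec : Claim_equal_to_ordered_processing_route_py := by
  intro processing _
  unfold Spec_to_ordered_processing_route_py to_ordered_processing_route_py to_ordered_processing_route_py_alt
  by_cases hnil : processing = []
  · simp [hnil]
  · simp only [hnil, if_false]
    set items := (processing.filter (fun kv => !(PySem.Str.strip kv.2 == ""))).map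
      (fun kv => (kv.1, PySem.Str.strip kv.2)) with hitems
    have hmain := sorted2_eq_flatMap_buckets (fun kv : String × String => pvStageRankA kv.1)
      (fun kv => PySem.Str.lower kv.1) _ pvRanks_pairwise items (fun y _ => pvStageRankA_mem y.1)
    by_cases hord : PySem.List.sorted2 items (fun kv => pvStageRankA kv.1)
        (fun kv => PySem.Str.lower kv.1) false = []
    · have hitems_nil : items = [] := by
        have hp := PySem.List.sorted2_perm items (fun kv : String × String => pvStageRankA kv.1)
          (fun kv => PySem.Str.lower kv.1) false
        rw [hord] at hp
        exact hp.symm.eq_nil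
      simp only [hitems_nil, List.filter_nil]
      simp [pvStageRank_eq, PySem.List.sorted, PySem.List.sorted2, PySem.Str.join]
    · simp only [hord, ite_self]
      rw [PySem.List.foldl_append_singleton_eq_map, List.nil_append]
      have hB : ([10, 20, 30, 40, 50, 60, 70, 80, 90] : List Int).flatMap (fun r =>
          (PySem.List.sorted (items.filter (fun kv => pvStageRankB kv.1 == r))
            (fun kv => PySem.Str.lower kv.1) false).map (fun kv => kv.2)) =
          (([10, 20, 30, 40, 50, 60, 70, 80, 90] : List Int).flatMap (fun r =>
            PySem.List.sorted (items.filter (fun kv => pvStageRankA kv.1 == r))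
              (fun kv => PySem.Str.lower kv.1) false)).map (fun kv => kv.2) := by
        rw [List.map_flatMap]
        simp only [pvStageRank_eq]
      rw [hB, ← hmain]
      simp
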